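-- pv_equiv track=rewrite | github.com/gswsfh/BFRL-Net | model.py | optimized_match_sequences
-- ===== SOURCE A (Python) =====
-- def optimized_match_sequences(pair, center):
--     i, j = 0, 0
--     match_count = 0
--     n, m = len(pair), len(center)
--     while j < m:
--         if i >= n:
--             break
--         if pair[i] == center[j]:
--             match_count += 1
--             i += 1
--             j += 1
--         else:
--             j += 1
--             if j >= m:
--                 break
--     return match_count
-- ===== SOURCE B (Python) =====
-- def optimized_match_sequences(pair, center):
--     # Pass 1: index center once -> value -> list of its positions (ascending).
--     positions = {}
--     for i, v in enumerate(center):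
--         positions[v] = positions.get(v, []) + [i]
--     # Pass 2: for each pattern element, take the first indexed position at or
--     # after the cursor (greedy earliest match), without touching center again.
--     count = 0
--     pos = 0
--     for x in pair:
--         p = next((q for q in positions.get(x, []) if q >= pos), None)
--         if p is None:
--             break
--         count += 1
--         pos = p + 1
--     return count
-- ===== Notes on version B (the rewrite author's own statement) =====
-- stated objective: alternative
-- what changed: B builds a value-to-position-list index of center in one pass and then serves each pattern element by looking up its position list and taking the first position at or after the cursor, instead of A's two-pointer walk over center.
import Mathlib
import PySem

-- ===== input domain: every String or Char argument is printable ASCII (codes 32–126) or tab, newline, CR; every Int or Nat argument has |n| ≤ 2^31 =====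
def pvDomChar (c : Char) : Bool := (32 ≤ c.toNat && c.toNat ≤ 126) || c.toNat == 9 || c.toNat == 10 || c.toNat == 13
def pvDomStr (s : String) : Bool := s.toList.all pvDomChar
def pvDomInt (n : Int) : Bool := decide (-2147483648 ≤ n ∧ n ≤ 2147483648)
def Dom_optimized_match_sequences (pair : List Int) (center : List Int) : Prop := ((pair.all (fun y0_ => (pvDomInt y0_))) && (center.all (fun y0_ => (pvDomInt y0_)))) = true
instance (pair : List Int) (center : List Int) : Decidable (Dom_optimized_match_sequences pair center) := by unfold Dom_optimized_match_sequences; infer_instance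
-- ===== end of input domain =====

-- B replaces A's two-pointer walk over center by a two-phase algorithm: build a
-- value → position-list index of center once, then answer each pattern element from
-- that index (first indexed position at or after the cursor). Same return value on
-- all inputs (objective: alternative; no speed claim).

-- ===== PORT A =====
-- A's while loop advances i (into pair) and j (into center) sequentially, so the
-- index-based loop is transliterated as recursion on the two list suffixes:
-- state (pair suffix from i, center suffix from j, match_count).
def pvGoA : List Int → List Int → Int → Int
  | _, [], c => c                                  -- j >= m: loop exits
  | [], _ :: _, c => c                             -- i >= n: break
  | p :: ps, x :: cs, c =>
    if p = x then pvGoA ps cs (c + 1)              -- match: i+=1, j+=1, count+=1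
    else pvGoA (p :: ps) cs c                      -- no match: j+=1 (and the inner 'if j >= m: break' is the same exit as the loop guard)

def optimized_match_sequences (pair : List Int) (center : List Int) : Int :=
  pvGoA pair center 0

-- ===== PORT B =====
-- Phase 1: positions[v] = positions.get(v, []) + [i] over enumerate(center)
-- is Dict.modify v [] (· ++ [i]).
def pvIndexB (center : List Int) : PySem.Dict Int (List Int) :=
  (PySem.List.enumerate center).foldl
    (fun d p => d.modify p.2 [] (fun l => l ++ [p.1])) PySem.Dict.empty

-- Phase 2: for x in pair — next((q for q in positions.get(x, []) if q >= pos), None)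
-- is List.find? on the looked-up position list; None breaks the loop.
def pvGoB (d : PySem.Dict Int (List Int)) : List Int → Int → Int → Int
  | [], _, c => c
  | x :: xs, pos, c =>
    match (d.getD x []).find? (fun q => pos ≤ q) with
    | none => c                                    -- p is None: break
    | some p => pvGoB d xs (p + 1) (c + 1)

def optimized_match_sequences_alt (pair : List Int) (center : List Int) : Int :=
  pvGoB (pvIndexB center) pair 0 0

-- ===== PRECONDITION & SPEC =====
def Spec_optimized_match_sequences (pair : List Int) (center : List Int) (out : Int) : Prop := out = optimized_match_sequences_alt pair center
instance (pair : List Int) (center : List Int) (out : Int) : Decidable (Spec_optimized_match_sequences pair center out) := by unfold Spec_optimized_match_sequences; infer_instance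

-- ===== CLAIM (what is proved, stated in full; the proofs are below) =====
def Claim_equal_optimized_match_sequences : Prop := ∀ (pair : List Int) (center : List Int), Dom_optimized_match_sequences pair center → Spec_optimized_match_sequences pair center (optimized_match_sequences pair center)

-- ===== LEMMAS AND PROOFS =====

-- Proof-side intermediate: A's loop rephrased as "find the next occurrence of x in
-- center at or after position pos" (index? on the dropped suffix), with a Nat cursor.
def pvGoI (center : List Int) : List Int → Nat → Int → Int
  | [], _, c => c
  | x :: xs, pos, c =>
    match PySem.List.index? (center.drop pos) x with
    | none => c
    | some r => pvGoI center xs (pos + r + 1) (c + 1)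

-- position list of x in cs when enumeration starts at s
def pvPos (x : Int) (s : Int) (cs : List Int) : List Int :=
  ((PySem.List.enumerate cs s).filter (fun p => p.2 == x)).map (·.1)

theorem pvGoA_eq_pvGoI (center : List Int) :
    ∀ (rest pair : List Int) (pos : Nat) (c : Int),
      center.drop pos = rest → pvGoA pair rest c = pvGoI center pair pos c := by
  intro rest
  induction rest with
  | nil =>
    intro pair pos c hdrop
    cases pair with
    | nil => simp [pvGoA, pvGoI]
    | cons x xs =>
      have h0 : List.idxOf? x (center.drop pos) = none := by
        rw [hdrop]; rfl
      simp [pvGoA, pvGoI, h0]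
  | cons y ys ih =>
    intro pair pos c hdrop
    have hdrop1 : center.drop (pos + 1) = ys := by
      have : center.drop (pos + 1) = (center.drop pos).drop 1 := by
        rw [List.drop_drop]
      rw [this, hdrop]; rfl
    cases pair with
    | nil => simp [pvGoA, pvGoI]
    | cons x xs =>
      by_cases hxy : x = y
      · subst hxy
        have hidx : PySem.List.index? (center.drop pos) x = some 0 := by
          rw [hdrop]; exact PySem.List.index?_cons_self x ys
        simp only [pvGoA, pvGoI, PySem.List.index?_eq_idxOf?] at hidx ⊢
        simp only [hidx]
        exact ih xs (pos + 1) (c + 1) hdrop1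
      · have hidx : PySem.List.index? (center.drop pos) x
            = (PySem.List.index? ys x).map (· + 1) := by
          rw [hdrop]; exact PySem.List.index?_cons_of_ne ys (Ne.symm hxy)
        have hA : pvGoA (x :: xs) (y :: ys) c = pvGoA (x :: xs) ys c := by
          simp [pvGoA, hxy]
        have hIH : pvGoA (x :: xs) ys c = pvGoI center (x :: xs) (pos + 1) c :=
          ih (x :: xs) (pos + 1) c hdrop1
        rw [hA, hIH]
        simp only [PySem.List.index?_eq_idxOf?] at hidx
        cases hr : List.idxOf? x ys with
        | none =>
          simp [pvGoI, hdrop1, hidx, hr]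
        | some r =>
          have h1 : pvGoI center (x :: xs) (pos + 1) c
              = pvGoI center xs (pos + 1 + r + 1) (c + 1) := by
            simp [pvGoI, hdrop1, hr]
          have h2 : pvGoI center (x :: xs) pos c
              = pvGoI center xs (pos + (r + 1) + 1) (c + 1) := by
            simp [pvGoI, hidx, hr]
          rw [h1, h2]
          congr 1
          omega

-- the built index maps x to its position list
theorem pvIndexB_getD (center : List Int) (x : Int) :
    (pvIndexB center).getD x [] = pvPos x 0 center := by
  have hmap : PySem.List.enumerate center 0
      = ((PySem.List.enumerate center 0).map Prod.swap).map Prod.swap := by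
    simp [List.map_map, Prod.swap_swap_eq]
  unfold pvIndexB pvPos
  rw [hmap, List.foldl_map]
  simp only [Prod.fst_swap, Prod.snd_swap]
  rw [PySem.Dict.getD_foldl_modify_append]
  simp [PySem.Dict.getD_empty, List.filter_map, List.map_map, Function.comp_def]

-- first indexed position ≥ pos is the next occurrence in the dropped suffix
theorem pvPos_find? (x : Int) (cs : List Int) :
    ∀ (s pos : Int),
      (pvPos x s cs).find? (fun q => decide (pos ≤ q))
        = (PySem.List.index? (cs.drop (pos - s).toNat) x).map
            (fun r : Nat => s + ((pos - s).toNat : Int) + r) := by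
  induction cs with
  | nil => intro s pos; simp [pvPos, PySem.List.enumerate_nil, PySem.List.index?]
  | cons y ys ih =>
    intro s pos
    have hP : pvPos x s (y :: ys)
        = (if y == x then [s] else []) ++ pvPos x (s + 1) ys := by
      unfold pvPos
      rw [PySem.List.enumerate_cons]
      by_cases h : y = x <;> simp [h]
    by_cases hle : pos ≤ s
    · -- drop index is 0 on the left; on the right (pos - (s+1)).toNat = 0 too
      have ht : (pos - s).toNat = 0 := by omega
      have ht1 : (pos - (s + 1)).toNat = 0 := by omega
      rw [hP]
      by_cases h : y = x
      · subst h
        simp only [BEq.rfl, if_true, List.singleton_append, List.find?_cons,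
          decide_eq_true hle, ht, List.drop_zero, PySem.List.index?_cons_self]
        simp
      · have hne : (y == x) = false := by simp [h]
        rw [hne]
        simp only [Bool.false_eq_true, if_false, List.nil_append]
        rw [ih (s + 1) pos, ht, ht1]
        rw [List.drop_zero, List.drop_zero]
        rw [PySem.List.index?_cons_of_ne ys h]
        cases PySem.List.index? ys x with
        | none => simp
        | some r => simp; ring
    · -- s < pos : the head position s (if any) fails the test
      have ht : (pos - s).toNat = (pos - (s + 1)).toNat + 1 := by omega
      have hdrop : (y :: ys).drop ((pos - s).toNat) = ys.drop ((pos - (s + 1)).toNat) := by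
        rw [ht]; rfl
      rw [hP, hdrop]
      have htail : ((if y == x then [s] else []) ++ pvPos x (s + 1) ys).find?
            (fun q => decide (pos ≤ q))
          = (pvPos x (s + 1) ys).find? (fun q => decide (pos ≤ q)) := by
        by_cases h : y = x
        · simp [h, decide_eq_false hle]
        · simp [h]
      rw [htail, ih (s + 1) pos]
      cases PySem.List.index? (ys.drop ((pos - (s + 1)).toNat)) x with
      | none => simp
      | some r => simp; omega

-- the intermediate loop equals B's index-driven loop
theorem pvGoI_eq_pvGoB (center : List Int) :
    ∀ (pair : List Int) (pos : Nat) (c : Int),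
      pvGoI center pair pos c = pvGoB (pvIndexB center) pair (pos : Int) c := by
  intro pair
  induction pair with
  | nil => intro pos c; simp [pvGoI, pvGoB]
  | cons x xs ih =>
    intro pos c
    have hfind : ((pvIndexB center).getD x []).find? (fun q => decide ((pos : Int) ≤ q))
        = (PySem.List.index? (center.drop pos) x).map
            (fun r : Nat => ((pos : Int)) + r) := by
      rw [pvIndexB_getD, pvPos_find? x center 0 (pos : Int)]
      have h0 : ((pos : Int) - 0).toNat = pos := by omega
      rw [h0]
      cases PySem.List.index? (center.drop pos) x with
      | none => rfl
      | some r => simp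
    simp only [pvGoI, pvGoB, hfind]
    cases hr : PySem.List.index? (center.drop pos) x with
    | none => rfl
    | some r =>
      simp only [Option.map_some]
      have hc : ((pos + r + 1 : Nat) : Int) = (pos : Int) + (r : Int) + 1 := by
        push_cast; ring
      rw [ih (pos + r + 1) (c + 1), hc]

-- ===== VERDICT (by name: the statement is the Claim_ definition above) =====
theorem optimized_match_sequences_spec : Claim_equal_optimized_match_sequences := by
  intro pair center _
  unfold Spec_optimized_match_sequences optimized_match_sequences optimized_match_sequences_alt
  rw [pvGoA_eq_pvGoI center center pair 0 0 rfl]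
  exact pvGoI_eq_pvGoB center pair 0 0
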